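-- pv_equiv track=rewrite | github.com/z3z1ma/dbt-osmosis | src/dbt_osmosis/core/voice_learning.py | _detect_tone_markers
-- ===== SOURCE A (Python) =====
-- def _detect_tone_markers(descriptions: list[str]) -> dict[str, int]:
--     """Detect tone indicators in descriptions.
--
--     Args:
--         descriptions: List of description strings
--
--     Returns:
--         Dictionary mapping tone markers to counts
--     """
--     markers = {
--         "imperative": 0,  # e.g., "contains", "represents", "stores"
--         "passive": 0,  # e.g., "is used to", "contains a"
--         "concise": 0,  # short descriptions
--         "detailed": 0,  # longer descriptions with multiple clauses
--         "technical": 0,  # includes technical terms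
--     }
--
--     for desc in descriptions:
--         if not desc or not desc.strip():
--             continue
--
--         words = desc.split()
--         word_count = len(words)
--
--         # Detect concise vs detailed
--         if word_count <= 5:
--             markers["concise"] += 1
--         elif word_count >= 15:
--             markers["detailed"] += 1
--
--         # Detect imperative vs passive
--         imperative_verbs = ["contains", "represents", "stores", "holds", "tracks", "records"]
--         passive_patterns = ["is used to", "is a", "contains a", "represents a"]
--
--         if any(v in desc.lower() for v in imperative_verbs):
--             markers["imperative"] += 1
--         if any(p in desc.lower() for p in passive_patterns):
--             markers["passive"] += 1
--
--         # Detect technical terms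
--         tech_terms = ["id", "key", "fk", "pk", "timestamp", "json", "uuid", "integer", "varchar"]
--         if any(term in desc.lower() for term in tech_terms):
--             markers["technical"] += 1
--
--     return markers
-- ===== SOURCE B (Python) =====
-- IMPERATIVE_VERBS = ["contains", "represents", "stores", "holds", "tracks", "records"]
-- PASSIVE_PATTERNS = ["is used to", "is a", "contains a", "represents a"]
-- TECH_TERMS = ["id", "key", "fk", "pk", "timestamp", "json", "uuid", "integer", "varchar"]
--
--
-- def _detect_tone_markers(descriptions: list[str]) -> dict[str, int]:
--     def ok(d):
--         return bool(d) and bool(d.strip())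
--
--     return {
--         "imperative": sum(1 for d in descriptions
--                           if ok(d) and any(v in d.lower() for v in IMPERATIVE_VERBS)),
--         "passive": sum(1 for d in descriptions
--                        if ok(d) and any(p in d.lower() for p in PASSIVE_PATTERNS)),
--         "concise": sum(1 for d in descriptions if ok(d) and len(d.split()) <= 5),
--         "detailed": sum(1 for d in descriptions if ok(d) and len(d.split()) >= 15),
--         "technical": sum(1 for d in descriptions
--                          if ok(d) and any(t in d.lower() for t in TECH_TERMS)),
--     }
-- ===== Notes on version B (the rewrite author's own statement) =====
-- stated objective: alternative
-- what changed: Replaced the single loop mutating a five-counter dict with five independent filtered-count passes (one sum per tone marker) assembled directly into the result dict.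
import Mathlib
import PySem

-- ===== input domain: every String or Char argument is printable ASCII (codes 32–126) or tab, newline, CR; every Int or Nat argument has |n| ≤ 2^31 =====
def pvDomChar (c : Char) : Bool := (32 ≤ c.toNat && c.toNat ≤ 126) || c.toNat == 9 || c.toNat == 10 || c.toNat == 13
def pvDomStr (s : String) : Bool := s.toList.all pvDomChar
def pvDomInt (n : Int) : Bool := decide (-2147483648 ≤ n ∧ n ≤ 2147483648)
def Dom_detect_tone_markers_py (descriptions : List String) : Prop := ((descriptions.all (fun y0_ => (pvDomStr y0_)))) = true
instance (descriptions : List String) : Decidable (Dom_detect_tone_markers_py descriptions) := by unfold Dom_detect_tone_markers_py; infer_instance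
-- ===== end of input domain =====

-- B replaces A's single loop over a five-counter dict by five independent filtered counts, one per marker (objective: alternative decomposition, same cost).

-- shared literal constants (both Pythons carry these same three lists)
def pvImperativeVerbs : List String := ["contains", "represents", "stores", "holds", "tracks", "records"]
def pvPassivePatterns : List String := ["is used to", "is a", "contains a", "represents a"]
def pvTechTerms : List String := ["id", "key", "fk", "pk", "timestamp", "json", "uuid", "integer", "varchar"]

-- ===== PORT A =====
-- the body of A's 'for desc in descriptions' loop, updating the markers dict
def pvStepA (d : PySem.Dict String Int) (desc : String) : PySem.Dict String Int :=
  if desc = "" ∨ PySem.Str.strip desc = "" then d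
  else
    let wc := (PySem.Str.split₀ desc).length
    let d1 := if wc ≤ 5 then d.modify "concise" 0 (· + 1)
              else if 15 ≤ wc then d.modify "detailed" 0 (· + 1) else d
    let d2 := if pvImperativeVerbs.any (fun v => PySem.Str.isIn v (PySem.Str.lower desc)) then
                d1.modify "imperative" 0 (· + 1) else d1
    let d3 := if pvPassivePatterns.any (fun p => PySem.Str.isIn p (PySem.Str.lower desc)) then
                d2.modify "passive" 0 (· + 1) else d2
    let d4 := if pvTechTerms.any (fun t => PySem.Str.isIn t (PySem.Str.lower desc)) then
                d3.modify "technical" 0 (· + 1) else d3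
    d4

def detect_tone_markers_py (descriptions : List String) : List (String × Int) :=
  (descriptions.foldl pvStepA
    (PySem.Dict.ofList [("imperative", 0), ("passive", 0), ("concise", 0), ("detailed", 0), ("technical", 0)])).items

-- ===== PORT B =====
-- Source B's 'ok(d)': non-empty and not whitespace-only
def pvOk (d : String) : Bool := decide (d ≠ "") && decide (PySem.Str.strip d ≠ "")

def detect_tone_markers_py_alt (descriptions : List String) : List (String × Int) :=
  [("imperative", (descriptions.countP (fun d => pvOk d && pvImperativeVerbs.any (fun v => PySem.Str.isIn v (PySem.Str.lower d))) : Int)),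
   ("passive", (descriptions.countP (fun d => pvOk d && pvPassivePatterns.any (fun p => PySem.Str.isIn p (PySem.Str.lower d))) : Int)),
   ("concise", (descriptions.countP (fun d => pvOk d && decide ((PySem.Str.split₀ d).length ≤ 5)) : Int)),
   ("detailed", (descriptions.countP (fun d => pvOk d && decide (15 ≤ (PySem.Str.split₀ d).length)) : Int)),
   ("technical", (descriptions.countP (fun d => pvOk d && pvTechTerms.any (fun t => PySem.Str.isIn t (PySem.Str.lower d))) : Int))]

-- ===== PRECONDITION & SPEC =====
def Spec_detect_tone_markers_py (descriptions : List String) (out : List (String × Int)) : Prop := out = detect_tone_markers_py_alt descriptions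
instance (descriptions : List String) (out : List (String × Int)) : Decidable (Spec_detect_tone_markers_py descriptions out) := by unfold Spec_detect_tone_markers_py; infer_instance

-- ===== CLAIM (what is proved, stated in full; the proofs are below) =====
def Claim_equal_detect_tone_markers_py : Prop := ∀ (descriptions : List String), Dom_detect_tone_markers_py descriptions → Spec_detect_tone_markers_py descriptions (detect_tone_markers_py descriptions)

-- ===== LEMMAS AND PROOFS =====

-- one loop iteration of A on the fixed-shape markers dict, phrased with B's per-field predicates
theorem pvStepA_items (a b c d e : Int) (x : String) :
    pvStepA (PySem.Dict.mk [("imperative", a), ("passive", b), ("concise", c), ("detailed", d), ("technical", e)]) x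
    = PySem.Dict.mk
        [("imperative", a + (if pvOk x && pvImperativeVerbs.any (fun v => PySem.Str.isIn v (PySem.Str.lower x)) then 1 else 0)),
         ("passive", b + (if pvOk x && pvPassivePatterns.any (fun p => PySem.Str.isIn p (PySem.Str.lower x)) then 1 else 0)),
         ("concise", c + (if pvOk x && decide ((PySem.Str.split₀ x).length ≤ 5) then 1 else 0)),
         ("detailed", d + (if pvOk x && decide (15 ≤ (PySem.Str.split₀ x).length) then 1 else 0)),
         ("technical", e + (if pvOk x && pvTechTerms.any (fun t => PySem.Str.isIn t (PySem.Str.lower x)) then 1 else 0))] := by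
  unfold pvStepA pvOk
  by_cases h1 : x = "" <;> by_cases h2 : PySem.Str.strip x = "" <;>
    simp [h1, h2, PySem.Dict.modify] <;> split_ifs <;>
    first
      | rfl
      | ((simp_all [PySem.Dict.insert, PySem.Dict.contains, PySem.Dict.getD, PySem.Dict.get?]) <;> omega)

-- A's whole loop from arbitrary counter values = those values plus B's counts
theorem pvLoopA (ds : List String) (a b c d e : Int) :
    (ds.foldl pvStepA (PySem.Dict.mk [("imperative", a), ("passive", b), ("concise", c), ("detailed", d), ("technical", e)])).items
    = [("imperative", a + (ds.countP (fun x => pvOk x && pvImperativeVerbs.any (fun v => PySem.Str.isIn v (PySem.Str.lower x))) : Int)),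
       ("passive", b + (ds.countP (fun x => pvOk x && pvPassivePatterns.any (fun p => PySem.Str.isIn p (PySem.Str.lower x))) : Int)),
       ("concise", c + (ds.countP (fun x => pvOk x && decide ((PySem.Str.split₀ x).length ≤ 5)) : Int)),
       ("detailed", d + (ds.countP (fun x => pvOk x && decide (15 ≤ (PySem.Str.split₀ x).length)) : Int)),
       ("technical", e + (ds.countP (fun x => pvOk x && pvTechTerms.any (fun t => PySem.Str.isIn t (PySem.Str.lower x))) : Int))] := by
  induction ds generalizing a b c d e with
  | nil => simp
  | cons x t ih =>
    rw [List.foldl_cons, pvStepA_items, ih]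
    simp only [List.countP_cons, List.cons.injEq, Prod.mk.injEq, and_true, true_and]
    and_intros <;> split_ifs <;> push_cast <;> ring

-- ===== VERDICT (by name: the statement is the Claim_ definition above) =====
theorem detect_tone_markers_py_spec : Claim_equal_detect_tone_markers_py := by
  intro ds _
  unfold Spec_detect_tone_markers_py detect_tone_markers_py detect_tone_markers_py_alt
  have h : PySem.Dict.ofList ([("imperative", 0), ("passive", 0), ("concise", 0), ("detailed", 0), ("technical", 0)] : List (String × Int))
      = PySem.Dict.mk [("imperative", 0), ("passive", 0), ("concise", 0), ("detailed", 0), ("technical", 0)] := by decide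
  rw [h, pvLoopA]
  simp
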